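-- pv_equiv track=rewrite | github.com/albertli2020/Machine-Learning-for-Hyperspectral-Images-of-Gliobastroma | HSI-plot-results-as-heatmap.py | determine_fold_index
-- ===== SOURCE A (Python) =====
-- test_roi_sets = [
--     ['P1_ROI_02', 'P3_ROI_02', 'P7_ROI_02', 'P5_ROI_01', 'P9_ROI_01'],
--     ['P1_ROI_03', 'P2_ROI_02', 'P5_ROI_02', 'P8_ROI_03', 'P11_ROI_01'],
--     ['P1_ROI_04', 'P2_ROI_03', 'P5_ROI_04', 'P7_ROI_03', 'P12_ROI_01'],
--     ['P5_ROI_03', 'P8_ROI_01', 'P1_ROI_01', 'P3_ROI_01', 'P13_ROI_01'],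
--     ['P7_ROI_01', 'P8_ROI_02', 'P2_ROI_01', 'P9_ROI_02', 'P10_ROI_01'],
--     ['P6_ROI_01', 'P6_ROI_02', 'P6_ROI_03']
-- ]
--
-- test_roi_set_truth_labels = [
--     [0, 0, 0, 1, 1],
--     [0, 0, 0, 1, 1],
--     [0, 0, 0, 1, 1],
--     [0, 0, 1, 1, 1],
--     [0, 0, 1, 1, 1],
--     [1, 0, 0]
-- ]
--
-- def determine_fold_index(patient_roi):
--     found = False
--     truth_label = 0
--     fold_id = 0
--     for i in range(len(test_roi_sets)):
--         if patient_roi in test_roi_sets[i]: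
--             fold_id = i
--             found = True
--     if found:
--         test_set = test_roi_sets[fold_id]
--         for i in range(len(test_set)):
--             if patient_roi == test_set[i]:
--                 truth_label = test_roi_set_truth_labels[fold_id][i]
--                 break
--
--     return found, truth_label, fold_id
-- ===== SOURCE B (Python) =====
-- test_roi_sets = [
--     ['P1_ROI_02', 'P3_ROI_02', 'P7_ROI_02', 'P5_ROI_01', 'P9_ROI_01'],
--     ['P1_ROI_03', 'P2_ROI_02', 'P5_ROI_02', 'P8_ROI_03', 'P11_ROI_01'],
--     ['P1_ROI_04', 'P2_ROI_03', 'P5_ROI_04', 'P7_ROI_03', 'P12_ROI_01'],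
--     ['P5_ROI_03', 'P8_ROI_01', 'P1_ROI_01', 'P3_ROI_01', 'P13_ROI_01'],
--     ['P7_ROI_01', 'P8_ROI_02', 'P2_ROI_01', 'P9_ROI_02', 'P10_ROI_01'],
--     ['P6_ROI_01', 'P6_ROI_02', 'P6_ROI_03']
-- ]
--
-- test_roi_set_truth_labels = [
--     [0, 0, 0, 1, 1],
--     [0, 0, 0, 1, 1],
--     [0, 0, 0, 1, 1],
--     [0, 0, 1, 1, 1],
--     [0, 0, 1, 1, 1],
--     [1, 0, 0]
-- ]
--
-- ROI_TABLE = {}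
-- for _fold_id, (_rois, _labels) in enumerate(zip(test_roi_sets, test_roi_set_truth_labels)):
--     for _roi, _label in zip(_rois, _labels):
--         ROI_TABLE[_roi] = (_fold_id, _label)
--
-- def determine_fold_index(patient_roi):
--     hit = ROI_TABLE.get(patient_roi)
--     if hit is None:
--         return False, 0, 0
--     fold_id, truth_label = hit
--     return True, truth_label, fold_id
-- ===== Notes on version B (the rewrite author's own statement) =====
-- stated objective: idiomatic
-- what changed: Replaces the two nested linear scans over the fold lists with a dict built once mapping each ROI to its (fold_index, truth_label), so the function is a single hash lookup.
import Mathlib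
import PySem

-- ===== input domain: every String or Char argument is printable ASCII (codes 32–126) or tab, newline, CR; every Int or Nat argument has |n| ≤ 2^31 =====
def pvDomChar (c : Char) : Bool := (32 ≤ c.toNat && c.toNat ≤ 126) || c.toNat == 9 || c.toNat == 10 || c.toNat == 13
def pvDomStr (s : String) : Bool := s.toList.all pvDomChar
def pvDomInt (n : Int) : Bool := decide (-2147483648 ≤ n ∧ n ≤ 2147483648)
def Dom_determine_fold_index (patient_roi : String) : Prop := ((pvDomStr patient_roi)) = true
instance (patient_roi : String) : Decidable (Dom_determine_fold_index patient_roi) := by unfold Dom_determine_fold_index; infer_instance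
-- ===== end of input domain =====

-- B replaces A's two nested scans over the fold lists by a dict (built once) mapping each ROI
-- to its (fold_index, truth_label) and a single lookup (objective: idiomatic).

-- ===== PORT A =====
def test_roi_sets : List (List String) := [
  ["P1_ROI_02", "P3_ROI_02", "P7_ROI_02", "P5_ROI_01", "P9_ROI_01"],
  ["P1_ROI_03", "P2_ROI_02", "P5_ROI_02", "P8_ROI_03", "P11_ROI_01"],
  ["P1_ROI_04", "P2_ROI_03", "P5_ROI_04", "P7_ROI_03", "P12_ROI_01"],
  ["P5_ROI_03", "P8_ROI_01", "P1_ROI_01", "P3_ROI_01", "P13_ROI_01"],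
  ["P7_ROI_01", "P8_ROI_02", "P2_ROI_01", "P9_ROI_02", "P10_ROI_01"],
  ["P6_ROI_01", "P6_ROI_02", "P6_ROI_03"]]

def test_roi_set_truth_labels : List (List Int) := [
  [0, 0, 0, 1, 1],
  [0, 0, 0, 1, 1],
  [0, 0, 0, 1, 1],
  [0, 0, 1, 1, 1],
  [0, 0, 1, 1, 1],
  [1, 0, 0]]

-- A's second loop ('for i in range(len(test_set)): if …: truth_label = …; break'):
-- walks the set and the label row in step, returns the label at the first match, else the accumulator.
def dfiScan (patient_roi : String) : List String → List Int → Int → Int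
  | s :: ss, l :: ls, acc => if patient_roi == s then l else dfiScan patient_roi ss ls acc
  | _, _, acc => acc

def determine_fold_index (patient_roi : String) : Bool × Int × Int :=
  -- first loop: for i in range(len(test_roi_sets)): if patient_roi in test_roi_sets[i]: fold_id = i; found = True
  let st := (PySem.List.pyRange 0 (test_roi_sets.length : Int) 1).foldl
    (fun (st : Bool × Int) i =>
      if (PySem.List.pyGetD test_roi_sets i []).contains patient_roi then (true, i) else st)
    (false, 0)
  let found := st.1
  let fold_id := st.2
  let truth_label :=
    if found then
      dfiScan patient_roi (PySem.List.pyGetD test_roi_sets fold_id [])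
        (PySem.List.pyGetD test_roi_set_truth_labels fold_id []) 0
    else 0
  (found, truth_label, fold_id)

-- ===== PORT B =====
-- ROI_TABLE: dict built once over enumerate(zip(sets, labels)), roi ↦ (fold_id, label)
def ROI_TABLE : PySem.Dict String (Int × Int) :=
  (PySem.List.enumerate (test_roi_sets.zip test_roi_set_truth_labels) 0).foldl
    (fun d p => (p.2.1.zip p.2.2).foldl
      (fun d q => PySem.Dict.insert d q.1 (p.1, q.2)) d)
    PySem.Dict.empty

def determine_fold_index_alt (patient_roi : String) : Bool × Int × Int :=
  match PySem.Dict.get? ROI_TABLE patient_roi with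
  | none => (false, 0, 0)
  | some (fold_id, truth_label) => (true, truth_label, fold_id)

-- ===== PRECONDITION & SPEC =====
def Spec_determine_fold_index (patient_roi : String) (out : Bool × Int × Int) : Prop := out = determine_fold_index_alt patient_roi
instance (patient_roi : String) (out : Bool × Int × Int) : Decidable (Spec_determine_fold_index patient_roi out) := by unfold Spec_determine_fold_index; infer_instance

-- ===== CLAIM (what is proved, stated in full; the proofs are below) =====
def Claim_equal_determine_fold_index : Prop := ∀ (patient_roi : String), Dom_determine_fold_index patient_roi → Spec_determine_fold_index patient_roi (determine_fold_index patient_roi)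

-- ===== LEMMAS AND PROOFS =====

theorem dfi_agrees (s : String) : determine_fold_index s = determine_fold_index_alt s := by
  by_cases h0 : s = "P1_ROI_02"
  · subst h0; decide
  by_cases h1 : s = "P3_ROI_02"
  · subst h1; decide
  by_cases h2 : s = "P7_ROI_02"
  · subst h2; decide
  by_cases h3 : s = "P5_ROI_01"
  · subst h3; decide
  by_cases h4 : s = "P9_ROI_01"
  · subst h4; decide
  by_cases h5 : s = "P1_ROI_03"
  · subst h5; decide
  by_cases h6 : s = "P2_ROI_02"
  · subst h6; decide
  by_cases h7 : s = "P5_ROI_02"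
  · subst h7; decide
  by_cases h8 : s = "P8_ROI_03"
  · subst h8; decide
  by_cases h9 : s = "P11_ROI_01"
  · subst h9; decide
  by_cases h10 : s = "P1_ROI_04"
  · subst h10; decide
  by_cases h11 : s = "P2_ROI_03"
  · subst h11; decide
  by_cases h12 : s = "P5_ROI_04"
  · subst h12; decide
  by_cases h13 : s = "P7_ROI_03"
  · subst h13; decide
  by_cases h14 : s = "P12_ROI_01"
  · subst h14; decide
  by_cases h15 : s = "P5_ROI_03"
  · subst h15; decide
  by_cases h16 : s = "P8_ROI_01"
  · subst h16; decide
  by_cases h17 : s = "P1_ROI_01"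
  · subst h17; decide
  by_cases h18 : s = "P3_ROI_01"
  · subst h18; decide
  by_cases h19 : s = "P13_ROI_01"
  · subst h19; decide
  by_cases h20 : s = "P7_ROI_01"
  · subst h20; decide
  by_cases h21 : s = "P8_ROI_02"
  · subst h21; decide
  by_cases h22 : s = "P2_ROI_01"
  · subst h22; decide
  by_cases h23 : s = "P9_ROI_02"
  · subst h23; decide
  by_cases h24 : s = "P10_ROI_01"
  · subst h24; decide
  by_cases h25 : s = "P6_ROI_01"
  · subst h25; decide
  by_cases h26 : s = "P6_ROI_02"
  · subst h26; decide
  by_cases h27 : s = "P6_ROI_03"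
  · subst h27; decide
  simp [determine_fold_index, determine_fold_index_alt, ROI_TABLE, test_roi_sets, test_roi_set_truth_labels, PySem.List.pyRange, PySem.List.pyGetD, PySem.List.enumerate, PySem.Dict.get?, PySem.Dict.insert, PySem.Dict.empty, List.range_succ, List.mem_cons, List.not_mem_nil, PySem.List.pyGet?, PySem.List.pyIdx?, h0, h1, h2, h3, h4, h5, h6, h7, h8, h9, h10, h11, h12, h13, h14, h15, h16, h17, h18, h19, h20, h21, h22, h23, h24, h25, h26, h27]
  simp [beq_eq_false_iff_ne.mpr (Ne.symm h0), beq_eq_false_iff_ne.mpr (Ne.symm h1), beq_eq_false_iff_ne.mpr (Ne.symm h2), beq_eq_false_iff_ne.mpr (Ne.symm h3), beq_eq_false_iff_ne.mpr (Ne.symm h4), beq_eq_false_iff_ne.mpr (Ne.symm h5), beq_eq_false_iff_ne.mpr (Ne.symm h6), beq_eq_false_iff_ne.mpr (Ne.symm h7), beq_eq_false_iff_ne.mpr (Ne.symm h8), beq_eq_false_iff_ne.mpr (Ne.symm h9), beq_eq_false_iff_ne.mpr (Ne.symm h10), beq_eq_false_iff_ne.mpr (Ne.symm h11), beq_eq_false_iff_ne.mpr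 (Ne.symm h12), beq_eq_false_iff_ne.mpr (Ne.symm h13), beq_eq_false_iff_ne.mpr (Ne.symm h14), beq_eq_false_iff_ne.mpr (Ne.symm h15), beq_eq_false_iff_ne.mpr (Ne.symm h16), beq_eq_false_iff_ne.mpr (Ne.symm h17), beq_eq_false_iff_ne.mpr (Ne.symm h18), beq_eq_false_iff_ne.mpr (Ne.symm h19), beq_eq_false_iff_ne.mpr (Ne.symm h20), beq_eq_false_iff_ne.mpr (Ne.symm h21), beq_eq_false_iff_ne.mpr (Ne.symm h22), beq_eq_false_iff_ne.mpr (Ne.symm h23), beq_eq_false_iff_ne.mpr (Ne.symm h24), beq_eq_false_iff_ne.mpr (Ne.symm h25), beq_eq_false_iff_ne.mpr (Ne.symm h26), beq_eq_false_iff_ne.mpr (Ne.symm h27)]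

-- ===== VERDICT (by name: the statement is the Claim_ definition above) =====
theorem determine_fold_index_spec : Claim_equal_determine_fold_index := by
  intro s _
  unfold Spec_determine_fold_index
  exact dfi_agrees s
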